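-- pv_equiv track=rewrite | github.com/Albert0-code/Dame | initialisation.py | initialisation
-- ===== SOURCE A (Python) =====
-- def initialisation(ligne,colonne,ligne_occupee):
--     plateau = []
--     for i in range(ligne):
--         plateau.append([])
--         for j in range(colonne):
--             plateau[i].append(0)
--
--     for i in range(ligne):
--         for j in range(i % 2, colonne, 2):
--             if i < ligne_occupee:
--                 plateau[i][j] = 1
--             elif i > ligne-ligne_occupee-1:
--                 plateau[i][j] = 2
--     return plateau
-- ===== SOURCE B (Python) =====
-- def initialisation(ligne, colonne, ligne_occupee):
--     return [[(1 if i < ligne_occupee else 2 if i > ligne - ligne_occupee - 1 else 0)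
--              if (i + j) % 2 == 0 else 0
--              for j in range(colonne)]
--             for i in range(ligne)]
-- ===== Notes on version B (the rewrite author's own statement) =====
-- stated objective: simpler
-- what changed: Replaces the two passes (zero-fill board, then overwrite checkered squares via a strided inner range with in-place assignment) by a single nested comprehension computing each cell's value directly from (i+j) parity and the row bands.
import Mathlib
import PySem

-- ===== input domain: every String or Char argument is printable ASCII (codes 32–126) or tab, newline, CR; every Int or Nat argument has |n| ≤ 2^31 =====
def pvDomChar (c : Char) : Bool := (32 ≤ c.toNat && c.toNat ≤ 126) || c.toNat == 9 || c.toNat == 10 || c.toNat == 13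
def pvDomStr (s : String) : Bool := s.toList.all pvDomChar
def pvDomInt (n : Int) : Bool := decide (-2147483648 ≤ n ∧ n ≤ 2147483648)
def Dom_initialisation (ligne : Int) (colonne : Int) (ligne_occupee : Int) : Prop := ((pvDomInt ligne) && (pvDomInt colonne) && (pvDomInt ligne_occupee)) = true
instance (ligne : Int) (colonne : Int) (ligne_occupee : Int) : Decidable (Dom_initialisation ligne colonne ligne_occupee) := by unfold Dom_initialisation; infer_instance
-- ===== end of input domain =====

-- B builds the board in one nested comprehension computing each cell directly, instead of
-- A's zero-fill pass followed by a strided overwrite pass; same result, simpler structure.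

-- ===== PORT A =====
-- A mutates plateau[i] (append) and plateau[i][j] (assignment); ported with List.set /
-- List.getD on the nonnegative indices the ranges produce (exact: i,j are in range here).
def initialisation (ligne : Int) (colonne : Int) (ligne_occupee : Int) : List (List Int) :=
  -- plateau (the zero board built by the first pass) inlined as the fold's initial value
  (PySem.List.pyRange 0 ligne 1).foldl
    (fun pl i =>
      (PySem.List.pyRange (PySem.Int.mod i 2) colonne 2).foldl
        (fun pl j =>
          if i < ligne_occupee then
            pl.set i.toNat ((pl.getD i.toNat []).set j.toNat 1)
          else if i > ligne - ligne_occupee - 1 then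
            pl.set i.toNat ((pl.getD i.toNat []).set j.toNat 2)
          else pl)
        pl)
    ((PySem.List.pyRange 0 ligne 1).foldl
      (fun pl i =>
        (PySem.List.pyRange 0 colonne 1).foldl
          (fun pl _ => pl.set i.toNat ((pl.getD i.toNat []) ++ [0])) (pl ++ [[]]))
      [])

-- ===== PORT B =====
def initialisation_alt (ligne : Int) (colonne : Int) (ligne_occupee : Int) : List (List Int) :=
  (PySem.List.pyRange 0 ligne 1).map (fun i =>
    (PySem.List.pyRange 0 colonne 1).map (fun j =>
      if PySem.Int.mod (i + j) 2 = 0 then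
        (if i < ligne_occupee then 1 else if i > ligne - ligne_occupee - 1 then 2 else 0)
      else 0))

-- ===== PRECONDITION & SPEC =====
def Spec_initialisation (ligne : Int) (colonne : Int) (ligne_occupee : Int) (out : List (List Int)) : Prop := out = initialisation_alt ligne colonne ligne_occupee
instance (ligne : Int) (colonne : Int) (ligne_occupee : Int) (out : List (List Int)) : Decidable (Spec_initialisation ligne colonne ligne_occupee out) := by unfold Spec_initialisation; infer_instance

-- ===== CLAIM (what is proved, stated in full; the proofs are below) =====
def Claim_equal_initialisation : Prop := ∀ (ligne : Int) (colonne : Int) (ligne_occupee : Int), Dom_initialisation ligne colonne ligne_occupee → Spec_initialisation ligne colonne ligne_occupee (initialisation ligne colonne ligne_occupee)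

-- ===== LEMMAS AND PROOFS =====

-- repeatedly setting positions of a row keeps its length
theorem pv_len_foldl_set (S : List Int) (v : Int) (r : List Int) :
    (S.foldl (fun r j => r.set j.toNat v) r).length = r.length := by
  induction S generalizing r with
  | nil => rfl
  | cons j S ih => simp [List.foldl_cons, ih, List.length_set]

-- value at k after setting every position of S (all ≥ 0) to v
theorem pv_getD_foldl_set (S : List Int) (v : Int) (r : List Int) (k : Nat)
    (hk : k < r.length) (hS : ∀ j ∈ S, 0 ≤ j) :
    (S.foldl (fun r j => r.set j.toNat v) r).getD k 0 =
      if ((k : Int) ∈ S) then v else r.getD k 0 := by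
  induction S generalizing r with
  | nil => simp
  | cons j S ih =>
    have hj : 0 ≤ j := hS j (by simp)
    have h1 := ih (r.set j.toNat v) (by simpa using hk) (fun x hx => hS x (by simp [hx]))
    simp only [List.foldl_cons] at *
    rw [h1]
    by_cases hmem : (k : Int) ∈ S
    · simp [hmem]
    · simp only [List.mem_cons, hmem, or_false]
      by_cases hkj : (k : Int) = j
      · have : j.toNat = k := by omega
        simp [hkj, List.getD, this, hk]
      · have : j.toNat ≠ k := by omega
        simp [hkj, List.getD, this]

-- filling the checkered positions of a zero row of width b equals the direct row
theorem pv_fill_row (i : Int) (b : Int) (v : Int) :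
    (PySem.List.pyRange (PySem.Int.mod i 2) b 2).foldl
        (fun r j => r.set j.toNat v) (List.replicate b.toNat 0) =
      (PySem.List.pyRange 0 b 1).map
        (fun j => if PySem.Int.mod (i + j) 2 = 0 then v else 0) := by
  have hlen : ((PySem.List.pyRange (PySem.Int.mod i 2) b 2).foldl
      (fun r j => r.set j.toNat v) (List.replicate b.toNat 0)).length = b.toNat := by
    simp [pv_len_foldl_set]
  apply List.ext_getElem
  · rw [hlen]
    simp [PySem.List.length_pyRange_one]
  · intro k h1 h2
    have hk : k < b.toNat := hlen ▸ h1
    have hS : ∀ j ∈ PySem.List.pyRange (PySem.Int.mod i 2) b 2, 0 ≤ j := by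
      intro j hj
      have := (PySem.List.mem_pyRange_iff_of_pos (by norm_num : (0:Int) < 2) j).1 hj
      have hm := PySem.Int.mod_nonneg i (b := 2) (by norm_num)
      omega
    have hget := pv_getD_foldl_set (PySem.List.pyRange (PySem.Int.mod i 2) b 2) v
      (List.replicate b.toNat 0) k (by simp [hk]) hS
    have hL : (((PySem.List.pyRange (PySem.Int.mod i 2) b 2).foldl
        (fun r j => r.set j.toNat v) (List.replicate b.toNat 0)))[k]'h1 =
        (((PySem.List.pyRange (PySem.Int.mod i 2) b 2).foldl
        (fun r j => r.set j.toNat v) (List.replicate b.toNat 0))).getD k 0 := by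
      rw [List.getD_eq_getElem]
    rw [hL, hget]
    have hR : ((PySem.List.pyRange 0 b 1).map
        (fun j => if PySem.Int.mod (i + j) 2 = 0 then v else 0))[k]'h2 =
        (if PySem.Int.mod (i + (0 + (k:Int))) 2 = 0 then v else 0) := by
      simp only [List.getElem_map, PySem.List.getElem_pyRange_one]
    rw [hR]
    have hz : (List.replicate b.toNat (0:Int)).getD k 0 = 0 := by
      simp [List.getD, List.getElem?_replicate]
      split <;> rfl
    rw [hz]
    have hmem : ((k : Int) ∈ PySem.List.pyRange (PySem.Int.mod i 2) b 2) ↔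
        (PySem.Int.mod (i + (0 + (k:Int))) 2 = 0) := by
      rw [PySem.List.mem_pyRange_iff_of_pos (by norm_num : (0:Int) < 2)]
      rw [PySem.Int.mod_eq_emod_of_pos (by norm_num), PySem.Int.mod_eq_emod_of_pos (by norm_num)]
      omega
    exact if_congr hmem rfl rfl

-- a row-local loop over the board is the loop on the row, written back once
theorem pv_board_row_fold (S : List Int) (pl : List (List Int)) (t : Nat) (v : Int)
    (ht : t < pl.length) :
    S.foldl (fun pl j => pl.set t ((pl.getD t []).set j.toNat v)) pl =
      pl.set t (S.foldl (fun r j => r.set j.toNat v) (pl.getD t [])) := by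
  induction S generalizing pl with
  | nil =>
    simp only [List.foldl_nil]
    rw [List.getD_eq_getElem _ _ ht]
    exact (List.set_getElem_self ht).symm
  | cons j S ih =>
    simp only [List.foldl_cons]
    rw [ih (pl.set t ((pl.getD t []).set j.toNat v)) (by simpa using ht)]
    rw [List.set_set]
    congr 1
    rw [List.getD, List.getElem?_set, if_pos rfl, if_pos ht]
    rfl

-- phase 1 inner loop: appending colonne zeros to the freshly appended last row
theorem pv_append_zeros (S : List Int) (pl : List (List Int)) (t : Nat)
    (ht : t < pl.length) :
    S.foldl (fun pl _ => pl.set t (pl.getD t [] ++ [0])) pl =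
      pl.set t (pl.getD t [] ++ List.replicate S.length (0:Int)) := by
  induction S generalizing pl with
  | nil =>
    simp only [List.foldl_nil, List.length_nil, List.replicate_zero, List.append_nil]
    rw [List.getD_eq_getElem _ _ ht]
    exact (List.set_getElem_self ht).symm
  | cons j S ih =>
    simp only [List.foldl_cons]
    rw [ih (pl.set t (pl.getD t [] ++ [0])) (by simpa using ht)]
    rw [List.set_set]
    congr 1
    rw [List.getD, List.getElem?_set, if_pos rfl, if_pos ht]
    simp only [Option.getD_some, List.length_cons, List.append_assoc]
    congr 1

-- phase 1: the whole first pass produces n zero rows of width colonne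
theorem pv_phase1 (n : Nat) (colonne : Int) :
    (PySem.List.pyRange 0 (n : Int) 1).foldl
      (fun pl i =>
        (PySem.List.pyRange 0 colonne 1).foldl
          (fun pl _ => pl.set i.toNat ((pl.getD i.toNat []) ++ [0])) (pl ++ [[]]))
      [] = List.replicate n (List.replicate colonne.toNat (0:Int)) := by
  induction n with
  | zero => simp [PySem.List.pyRange_one_eq_nil]
  | succ n ih =>
    have h : ((n:Int) + 1) = ((n+1 : Nat) : Int) := by push_cast ; ring
    rw [show ((n+1 : Nat) : Int) = (n:Int) + 1 by push_cast ; ring,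
        PySem.List.pyRange_one_succ_right (by positivity)]
    rw [List.foldl_append, ih]
    simp only [List.foldl_cons, List.foldl_nil]
    rw [pv_append_zeros _ _ _ (by simp [Int.toNat_natCast])]
    simp [Int.toNat_natCast, List.replicate_succ',
      PySem.List.length_pyRange_one, List.set_append_right]

def pvZRow (colonne : Int) : List Int := List.replicate colonne.toNat 0

def pvRow (ligne colonne ligne_occupee : Int) (i : Int) : List Int :=
  (PySem.List.pyRange 0 colonne 1).map (fun j =>
    if PySem.Int.mod (i + j) 2 = 0 then
      (if i < ligne_occupee then 1 else if i > ligne - ligne_occupee - 1 then 2 else 0)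
    else 0)

-- when row i lies in the untouched middle band, the zero row already equals B's row
theorem pv_zrow_mid (ligne colonne ligne_occupee : Int) (i : Int)
    (h1 : ¬ i < ligne_occupee) (h2 : ¬ i > ligne - ligne_occupee - 1) :
    pvZRow colonne = pvRow ligne colonne ligne_occupee i := by
  unfold pvZRow pvRow
  simp only [h1, h2, if_false, ite_self]
  symm
  rw [List.eq_replicate_iff]
  simp [PySem.List.length_pyRange_one]

-- phase 2: the overwrite pass turns the zero board into B's board, rows beyond n untouched
theorem pv_phase2 (ligne colonne ligne_occupee : Int) (n : Nat) (extra : List (List Int)) :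
    (PySem.List.pyRange 0 (n : Int) 1).foldl
      (fun pl i =>
        (PySem.List.pyRange (PySem.Int.mod i 2) colonne 2).foldl
          (fun pl j =>
            if i < ligne_occupee then
              pl.set i.toNat ((pl.getD i.toNat []).set j.toNat 1)
            else if i > ligne - ligne_occupee - 1 then
              pl.set i.toNat ((pl.getD i.toNat []).set j.toNat 2)
            else pl)
          pl)
      (List.replicate n (pvZRow colonne) ++ extra) =
      (PySem.List.pyRange 0 (n : Int) 1).map (pvRow ligne colonne ligne_occupee) ++ extra := by
  induction n generalizing extra with
  | zero => simp [PySem.List.pyRange_one_eq_nil]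
  | succ n ih =>
    rw [show ((n+1 : Nat) : Int) = (n:Int) + 1 by push_cast ; ring,
        PySem.List.pyRange_one_succ_right (by positivity)]
    rw [List.foldl_append, List.map_append]
    rw [show List.replicate (n+1) (pvZRow colonne) ++ extra =
        List.replicate n (pvZRow colonne) ++ (pvZRow colonne :: extra) by
      simp [List.replicate_succ']]
    rw [ih (pvZRow colonne :: extra)]
    simp only [List.foldl_cons, List.foldl_nil, List.map_cons, List.map_nil]
    set T := (PySem.List.pyRange 0 (n : Int) 1).map (pvRow ligne colonne ligne_occupee) with hT
    have hTlen : T.length = n := by simp [hT, PySem.List.length_pyRange_one]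
    have htn : ((n:Int)).toNat = n := Int.toNat_natCast n
    have hlt : ((n:Int)).toNat < (T ++ pvZRow colonne :: extra).length := by
      simp [htn, hTlen]
    have hgetD : (T ++ pvZRow colonne :: extra).getD ((n:Int)).toNat [] = pvZRow colonne := by
      rw [htn, List.getD, List.getElem?_append_right (by omega), hTlen]
      simp
    have hset : ∀ r, (T ++ pvZRow colonne :: extra).set ((n:Int)).toNat r = T ++ r :: extra := by
      intro r
      rw [htn, List.set_append_right _ _ (by omega), hTlen]
      simp
    have hfill : ∀ v, (PySem.List.pyRange (PySem.Int.mod (n:Int) 2) colonne 2).foldl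
        (fun r j => r.set j.toNat v) (pvZRow colonne) =
        (PySem.List.pyRange 0 colonne 1).map
          (fun j => if PySem.Int.mod ((n:Int) + j) 2 = 0 then v else 0) :=
      fun v => pv_fill_row (n:Int) colonne v
    by_cases hc1 : (n:Int) < ligne_occupee
    · simp only [hc1, if_true]
      rw [pv_board_row_fold _ _ _ _ hlt, hgetD, hfill, hset]
      simp [pvRow, hc1]
    · by_cases hc2 : (n:Int) > ligne - ligne_occupee - 1
      · simp only [hc1, hc2, if_false, if_true]
        rw [pv_board_row_fold _ _ _ _ hlt, hgetD, hfill, hset]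
        simp [pvRow, hc1, hc2]
      · simp only [hc1, hc2, if_false]
        rw [PySem.List.foldl_ignore]
        rw [pv_zrow_mid ligne colonne ligne_occupee (n:Int) hc1 hc2]
        simp

-- ===== VERDICT (by name: the statement is the Claim_ definition above) =====
theorem initialisation_spec : Claim_equal_initialisation := by
  intro ligne colonne ligne_occupee _
  unfold Spec_initialisation initialisation initialisation_alt
  by_cases hl : 0 ≤ ligne
  · rw [show ligne = ((ligne.toNat : Nat) : Int) from (Int.toNat_of_nonneg hl).symm]
    generalize ligne.toNat = m
    rw [pv_phase1 m colonne]
    have h2 := pv_phase2 ((m:Nat) : Int) colonne ligne_occupee m []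
    rw [List.append_nil, List.append_nil] at h2
    rw [show List.replicate m (pvZRow colonne) =
        List.replicate m (List.replicate colonne.toNat (0:Int)) from rfl] at h2
    rw [h2]
    rfl
  · rw [PySem.List.pyRange_one_eq_nil (show ligne ≤ 0 by omega)]
    rfl
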